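-- pv_equiv track=rewrite | github.com/bmmurthum/LeetCode-Problems | Medium/Minimum-Consecutive-Cards-To-Pick-Up/minumumConsecutiveCardsToPickUp.py | minimumCardPickup
-- ===== SOURCE A (Python) =====
-- def minimumCardPickup(list):
--     lastOccurance = {str(list[0]): 0}
--     min = 100001
--     for j in range(len(list)-1):
--         i = j+1
--         if str(list[i]) in lastOccurance:
--             dist = i - lastOccurance[str(list[i])] + 1
--             if dist < min:
--                 min = dist
--                 # Smallest case. Found solution.
--                 if dist == 2:
--                     return 2
--             lastOccurance[str(list[i])] = i
--         else:
--             lastOccurance[str(list[i])] = i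
--     # No found matching cards.
--     if min == 100001:
--         return -1
--     # Found a minimum case.
--     else:
--         return min
-- ===== SOURCE B (Python) =====
-- def minimumCardPickup(list):
--     # Group all positions by value (str() keys, as the original's dict uses),
--     # then take the minimum over consecutive positions within each group.
--     positions = {}
--     for i, v in enumerate(list):
--         positions.setdefault(str(v), []).append(i)
--     best = 100001  # the original's "no pair within the problem bound" sentinel
--     for idx in positions.values():
--         for a, b in zip(idx, idx[1:]):
--             best = min(best, b - a + 1)
--     return -1 if best == 100001 else best
-- ===== Notes on version B (the rewrite author's own statement) =====
-- stated objective: alternative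
-- what changed: Instead of a single left-to-right scan that tracks each value's last occurrence in a dict, keeps a running minimum and early-returns on distance 2, B builds a positions index (str(value) -> list of all indices) in one pass and then takes the minimum of consecutive-index differences within each group.
-- crash fix: A raises IndexError on the empty list (it reads list[0] to seed its dict); B naturally returns -1 (no repeated card) there. — e.g. on minimumCardPickup([]): A raises IndexError, B returns -1
import Mathlib
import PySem

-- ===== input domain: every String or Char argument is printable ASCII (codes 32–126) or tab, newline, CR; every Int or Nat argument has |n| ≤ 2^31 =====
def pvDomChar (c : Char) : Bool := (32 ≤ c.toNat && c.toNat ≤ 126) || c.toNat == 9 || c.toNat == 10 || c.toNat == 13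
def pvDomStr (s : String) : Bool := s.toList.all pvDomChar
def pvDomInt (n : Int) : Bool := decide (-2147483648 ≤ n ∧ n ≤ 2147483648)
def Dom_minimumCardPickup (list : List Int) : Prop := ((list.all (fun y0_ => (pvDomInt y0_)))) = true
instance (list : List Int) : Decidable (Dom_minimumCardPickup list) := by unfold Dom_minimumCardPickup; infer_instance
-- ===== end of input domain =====

-- B groups all positions by value and minimises over consecutive positions per group,
-- instead of A's single scan with a last-occurrence dict, running minimum and early return
-- (objective: alternative; equal return values — A raises IndexError on [], B returns -1 there).

-- ===== PORT A =====
-- the 'for j in range(len(list)-1)' loop of A, walking the tail with i = current index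
def pvAgo : List Int → Int → PySem.Dict String Int → Int → Int
  | [], _, _, m => if m == 100001 then -1 else m
  | x :: rest, i, d, m =>
    let k := PySem.Int.toStr x
    match d.get? k with
    | some prev =>
      let dist := i - prev + 1
      if dist < m then
        (if dist == 2 then 2 else pvAgo rest (i + 1) (d.insert k i) dist)
      else pvAgo rest (i + 1) (d.insert k i) m
    | none => pvAgo rest (i + 1) (d.insert k i) m

def minimumCardPickup (list : List Int) : Int :=
  match list with
  | [] => -1  -- Python raises IndexError here (list[0]); excluded by Pre_
  | x :: rest => pvAgo rest 1 (PySem.Dict.ofList [(PySem.Int.toStr x, 0)]) 100001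

-- ===== PORT B =====
-- positions = {}; for i, v in enumerate(list): positions.setdefault(str(v), []).append(i)
def pvBbuild (list : List Int) : PySem.Dict String (List Int) :=
  (PySem.List.enumerate list 0).foldl
    (fun d p => d.modify (PySem.Int.toStr p.2) [] (fun xs => xs ++ [p.1])) PySem.Dict.empty

def minimumCardPickup_alt (list : List Int) : Int :=
  let positions := pvBbuild list
  let best := positions.values.foldl
    (fun b idx => (idx.zip idx.tail).foldl (fun b p => min b (p.2 - p.1 + 1)) b) 100001
  if best == 100001 then -1 else best

-- ===== PRECONDITION & SPEC =====
-- Python A raises IndexError on the empty list (it reads list[0]); that is the only input excluded.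
def Pre_minimumCardPickup (list : List Int) : Prop := list ≠ []
instance (list : List Int) : Decidable (Pre_minimumCardPickup list) := by unfold Pre_minimumCardPickup; infer_instance
def pvWitness_minimumCardPickup : List Int := [3, 1, 3, 1]

-- A raises IndexError on the empty list; B returns -1 (no repeated card) there.
def Raises_minimumCardPickup (list : List Int) : Prop := list = []
instance (list : List Int) : Decidable (Raises_minimumCardPickup list) := by unfold Raises_minimumCardPickup; infer_instance
def pvRaiseWitness_minimumCardPickup : List Int := []
def pvRaiseWitnessOut_minimumCardPickup : Int := -1

def Spec_minimumCardPickup (list : List Int) (out : Int) : Prop := out = minimumCardPickup_alt list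
instance (list : List Int) (out : Int) : Decidable (Spec_minimumCardPickup list out) := by unfold Spec_minimumCardPickup; infer_instance

-- ===== CLAIM (what is proved, stated in full; the proofs are below) =====
def Claim_equal_minimumCardPickup : Prop := ∀ (list : List Int), Dom_minimumCardPickup list → Pre_minimumCardPickup list → Spec_minimumCardPickup list (minimumCardPickup list)
def Claim_raises_minimumCardPickup : Prop := (∀ (list : List Int), Dom_minimumCardPickup list → Raises_minimumCardPickup list → ¬ Pre_minimumCardPickup list) ∧ (Dom_minimumCardPickup (pvRaiseWitness_minimumCardPickup) ∧ Raises_minimumCardPickup (pvRaiseWitness_minimumCardPickup) ∧ minimumCardPickup_alt (pvRaiseWitness_minimumCardPickup) = pvRaiseWitnessOut_minimumCardPickup)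

-- ===== LEMMAS AND PROOFS =====

-- the str() key both programs group by
def pvKey (v : Int) : String := PySem.Int.toStr v

-- all positions of key s in l, in increasing order
def pvOcc (l : List Int) (s : String) : List Int :=
  (PySem.List.enumerate l 0).filterMap (fun q => if pvKey q.2 == s then some q.1 else none)

-- last position of key s in l (what A's dict stores)
def pvLast (l : List Int) (s : String) : Option Int := (pvOcc l s).getLast?

-- gaps between consecutive positions
def pvGapsOf (idx : List Int) : List Int := (idx.zip idx.tail).map (fun p => p.2 - p.1 + 1)

-- the gaps A's loop measures while consuming rest, with p already consumed
def pvStep : List Int → List Int → List Int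
  | _, [] => []
  | p, x :: rest =>
    (match pvLast p (pvKey x) with
     | some prev => [((p.length : Int) - prev + 1)]
     | none => []) ++ pvStep (p ++ [x]) rest

-- the gaps B collects
def pvBgaps (l : List Int) : List Int :=
  (((pvBbuild l).keys).map (fun s => pvGapsOf (pvOcc l s))).flatten

def pvMin (xs : List Int) : Int := xs.foldr min 100001

-- "g is the span of some pair of equal-keyed positions of l"
def pvP (l : List Int) (g : Int) : Prop :=
  ∃ i j : Nat, i < j ∧ j < l.length ∧ pvKey (l.getD i 0) = pvKey (l.getD j 0) ∧ g = (j : Int) - i + 1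

-- ---- generic min facts ----
theorem pvMin_le_top (xs : List Int) : pvMin xs ≤ 100001 := by
  induction xs with
  | nil => simp [pvMin]
  | cons x t ih => simp only [pvMin, List.foldr] at *; omega

theorem pvMin_cons (x : Int) (t : List Int) : pvMin (x :: t) = min x (pvMin t) := rfl

theorem pvMin_append (xs ys : List Int) : pvMin (xs ++ ys) = min (pvMin xs) (pvMin ys) := by
  induction xs with
  | nil => have := pvMin_le_top ys; simp [pvMin] at *; omega
  | cons x t ih => simp only [List.cons_append, pvMin_cons, ih]; omega

theorem pvMin_le_of_mem {xs : List Int} {g : Int} (h : g ∈ xs) : pvMin xs ≤ g := by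
  induction xs with
  | nil => simp at h
  | cons x t ih =>
    rcases List.mem_cons.mp h with rfl | h
    · rw [pvMin_cons]; omega
    · have := ih h; rw [pvMin_cons]; omega

theorem pvMin_mem_or (xs : List Int) : pvMin xs = 100001 ∨ pvMin xs ∈ xs := by
  induction xs with
  | nil => left; rfl
  | cons x t ih =>
    rw [pvMin_cons]
    rcases le_total x (pvMin t) with h | h
    · right; simp [min_eq_left h]
    · rw [min_eq_right h]
      rcases ih with h1 | h1
      · left; exact h1
      · right; right; exact h1

theorem pvMin_two_le {xs : List Int} (h : ∀ g ∈ xs, 2 ≤ g) : 2 ≤ pvMin xs := by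
  induction xs with
  | nil => simp [pvMin]
  | cons x t ih =>
    rw [pvMin_cons]
    have h1 := h x (by simp)
    have h2 := ih (fun g hg => h g (by simp [hg]))
    omega

theorem pvMin_eq_of_dom {xs ys : List Int}
    (h1 : ∀ g ∈ xs, ∃ g' ∈ ys, g' ≤ g) (h2 : ∀ g ∈ ys, ∃ g' ∈ xs, g' ≤ g) :
    pvMin xs = pvMin ys := by
  have hle : ∀ (as bs : List Int), (∀ g ∈ as, ∃ g' ∈ bs, g' ≤ g) → pvMin bs ≤ pvMin as := by
    intro as bs h
    rcases pvMin_mem_or as with he | hm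
    · rw [he]; exact pvMin_le_top bs
    · obtain ⟨g', hg', hle'⟩ := h _ hm
      exact le_trans (pvMin_le_of_mem hg') hle'
  exact le_antisymm (hle ys xs h2) (hle xs ys h1)

theorem pvFoldl_min (xs : List Int) : ∀ c : Int, c ≤ 100001 → xs.foldl min c = min c (pvMin xs) := by
  induction xs with
  | nil => intro c hc; simp [pvMin]; omega
  | cons x t ih =>
    intro c hc
    rw [List.foldl_cons, ih (min c x) (by omega), pvMin_cons]
    omega

-- ---- occ / last facts ----
theorem mem_pvOcc {l : List Int} {s : String} {v : Int} :
    v ∈ pvOcc l s ↔ ∃ k : Nat, k < l.length ∧ v = (k : Int) ∧ pvKey (l.getD k 0) = s := by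
  unfold pvOcc
  simp only [List.mem_filterMap, PySem.List.mem_enumerate_iff]
  constructor
  · rintro ⟨p, ⟨k, hk, rfl⟩, hif⟩
    simp only at hif
    split at hif
    · rename_i hkey
      refine ⟨k, hk, by simpa using hif.symm, ?_⟩
      rw [List.getD_eq_getElem l 0 hk]
      exact eq_of_beq hkey
    · exact absurd hif (by simp)
  · rintro ⟨k, hk, rfl, hkey⟩
    refine ⟨((0 : Int) + k, l[k]), ⟨k, hk, rfl⟩, ?_⟩
    rw [List.getD_eq_getElem l 0 hk] at hkey
    simp [hkey]

theorem pvOcc_sorted (l : List Int) (s : String) : (pvOcc l s).Pairwise (· < ·) := by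
  unfold pvOcc
  have h := PySem.List.pairwise_lt_enumerate (xs := l) (s := 0)
  refine h.filterMap (fun q : Int × Int => if pvKey q.2 == s then some q.1 else none) ?_
  intro a b hab x hx y hy
  simp only at hx hy
  split at hx <;> split at hy <;> simp_all

theorem pvOcc_append_singleton (p : List Int) (x : Int) (s : String) :
    pvOcc (p ++ [x]) s = pvOcc p s ++ (if pvKey x == s then [(p.length : Int)] else []) := by
  unfold pvOcc
  rw [PySem.List.enumerate_append, List.filterMap_append]
  congr 1
  simp [PySem.List.enumerate]
  split <;> simp_all

theorem pvLast_append_singleton (p : List Int) (x : Int) (s : String) :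
    pvLast (p ++ [x]) s = if pvKey x == s then some (p.length : Int) else pvLast p s := by
  unfold pvLast
  rw [pvOcc_append_singleton]
  split
  · exact List.getLast?_concat
  · simp

theorem pvLast_mem {p : List Int} {s : String} {v : Int} (h : pvLast p s = some v) : v ∈ pvOcc p s :=
  List.mem_of_getLast? h

theorem sorted_le_getLast : ∀ (xs : List Int), xs.Pairwise (· < ·) → ∀ {v w : Int}, v ∈ xs → xs.getLast? = some w → v ≤ w := by
  intro xs
  induction xs with
  | nil => intro _ v w hv; simp at hv
  | cons x t ih =>
    intro hp v w hv hl
    rcases List.mem_cons.mp hv with rfl | hvt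
    · match t with
      | [] => simp at hl; omega
      | y :: t' =>
        rw [List.getLast?_cons_cons] at hl
        have hw := List.mem_of_getLast? hl
        have := (List.pairwise_cons.mp hp).1 w hw
        omega
    · match t with
      | [] => simp at hvt
      | y :: t' =>
        rw [List.getLast?_cons_cons] at hl
        exact ih (List.pairwise_cons.mp hp).2 hvt hl

theorem pvLast_ge {p : List Int} {s : String} {v w : Int} (hv : v ∈ pvOcc p s)
    (hw : pvLast p s = some w) : v ≤ w :=
  sorted_le_getLast _ (pvOcc_sorted p s) hv hw

theorem pvLast_isSome {p : List Int} {s : String} {v : Int} (hv : v ∈ pvOcc p s) :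
    ∃ w, pvLast p s = some w := by
  unfold pvLast
  have : pvOcc p s ≠ [] := List.ne_nil_of_mem hv
  exact Option.isSome_iff_exists.mp (List.getLast?_isSome.mpr this)

theorem pvLast_bounds {p : List Int} {s : String} {v : Int} (h : pvLast p s = some v) :
    0 ≤ v ∧ v < (p.length : Int) := by
  obtain ⟨k, hk, rfl, _⟩ := mem_pvOcc.mp (pvLast_mem h)
  omega

-- ---- pvP basic ----
theorem pvP_two_le {l : List Int} {g : Int} (h : pvP l g) : 2 ≤ g := by
  obtain ⟨i, j, hij, _, _, hg⟩ := h; omega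

-- ---- A side ----
theorem pvStep_mem_P : ∀ (rest p : List Int) (g : Int), g ∈ pvStep p rest → pvP (p ++ rest) g := by
  intro rest
  induction rest with
  | nil => intro p g hg; simp [pvStep] at hg
  | cons x rest ih =>
    intro p g hg
    rw [pvStep, List.mem_append] at hg
    rcases hg with hg | hg
    · rcases hpl : pvLast p (pvKey x) with _ | prev <;> rw [hpl] at hg
      · simp at hg
      · simp at hg
        obtain ⟨k, hk, rfl, hkey⟩ := mem_pvOcc.mp (pvLast_mem hpl)
        refine ⟨k, p.length, hk, by simp, ?_, by omega⟩
        rw [List.getD_append _ _ _ _ hk, List.getD_append_right _ _ _ _ (le_refl _)]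
        simpa using hkey
    · have := ih (p ++ [x]) g hg
      rwa [List.append_assoc, List.singleton_append] at this

theorem pvStep_dom : ∀ (rest p : List Int) (i j : Nat),
    p.length ≤ j → j < (p ++ rest).length → i < j →
    pvKey ((p ++ rest).getD i 0) = pvKey ((p ++ rest).getD j 0) →
    ∃ g' ∈ pvStep p rest, g' ≤ (j : Int) - i + 1 := by
  intro rest
  induction rest with
  | nil => intro p i j h1 h2 _ _; simp at h2; omega
  | cons x rest ih =>
    intro p i j h1 h2 h3 hkey
    rcases eq_or_lt_of_le h1 with rfl | hlt
    · -- j = p.length : the later occurrence is x itself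
      have hx : (p ++ x :: rest).getD p.length 0 = x := by
        rw [List.getD_append_right _ _ _ _ (le_refl _)]; simp
      rw [hx] at hkey
      have hip : i < p.length := h3
      have hi : (p ++ x :: rest).getD i 0 = p.getD i 0 := List.getD_append _ _ _ _ hip
      rw [hi] at hkey
      have hiocc : (i : Int) ∈ pvOcc p (pvKey x) :=
        mem_pvOcc.mpr ⟨i, hip, rfl, hkey⟩
      obtain ⟨w, hw⟩ := pvLast_isSome hiocc
      have hge := pvLast_ge hiocc hw
      refine ⟨(p.length : Int) - w + 1, ?_, by omega⟩
      rw [pvStep, List.mem_append]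
      left; rw [hw]; simp
    · obtain ⟨g', hg', hle⟩ := ih (p ++ [x]) i j (by simpa using hlt) (by simpa using h2)
        h3 (by rwa [List.append_assoc, List.singleton_append])
      refine ⟨g', ?_, hle⟩
      rw [pvStep, List.mem_append]; right; exact hg'

theorem pvAgo_eq : ∀ (rest p : List Int) (d : PySem.Dict String Int) (m : Int),
    (∀ s, d.get? s = pvLast p s) → 2 ≤ m → m ≤ 100001 →
    pvAgo rest (p.length : Int) d m =
      (if (min m (pvMin (pvStep p rest)) == 100001) then -1 else min m (pvMin (pvStep p rest))) := by
  intro rest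
  induction rest with
  | nil =>
    intro p d m _ _ hm2
    have : min m (pvMin (pvStep p [])) = m := by
      simp [pvStep, pvMin]; omega
    rw [this, pvAgo]
  | cons x rest ih =>
    intro p d m hd hm1 hm2
    have hins : ∀ s, (d.insert (PySem.Int.toStr x) (p.length : Int)).get? s = pvLast (p ++ [x]) s := by
      intro s
      rw [PySem.Dict.get?_insert, pvLast_append_singleton]
      by_cases hs : s = pvKey x
      · simp [hs, pvKey]
      · have h1 : ¬ (s = PySem.Int.toStr x) := by simpa [pvKey] using hs
        have h2 : ¬ ((pvKey x == s) = true) := by simp; exact fun h => hs h.symm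
        rw [if_neg h1, if_neg h2, hd s]
    have hlen : ((p ++ [x]).length : Int) = (p.length : Int) + 1 := by simp
    have hG2 : 2 ≤ pvMin (pvStep (p ++ [x]) rest) :=
      pvMin_two_le (fun g hg => pvP_two_le (pvStep_mem_P rest (p ++ [x]) g hg))
    have hGle : pvMin (pvStep (p ++ [x]) rest) ≤ 100001 := pvMin_le_top _
    rw [pvAgo]
    simp only [hd (PySem.Int.toStr x)]
    show (match pvLast p (pvKey x) with
      | some prev =>
        let dist := (p.length : Int) - prev + 1
        if dist < m then
          (if dist == 2 then 2 else pvAgo rest ((p.length : Int) + 1) (d.insert (PySem.Int.toStr x) (p.length : Int)) dist)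
        else pvAgo rest ((p.length : Int) + 1) (d.insert (PySem.Int.toStr x) (p.length : Int)) m
      | none => pvAgo rest ((p.length : Int) + 1) (d.insert (PySem.Int.toStr x) (p.length : Int)) m) = _
    rcases hpl : pvLast p (pvKey x) with _ | prev
    · rw [← hlen, ih (p ++ [x]) _ m hins hm1 hm2]
      simp [pvStep, hpl]
    · obtain ⟨hprev0, hprevlt⟩ := pvLast_bounds hpl
      set G := pvMin (pvStep (p ++ [x]) rest) with hGdef
      have hstep : pvMin (pvStep p (x :: rest)) = min ((p.length : Int) - prev + 1) G := by
        rw [pvStep, hpl]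
        simp only [List.singleton_append, pvMin_cons, hGdef]
      simp only
      set dist := (p.length : Int) - prev + 1 with hdist
      have hdist2 : 2 ≤ dist := by omega
      by_cases hlt : dist < m
      · rw [if_pos hlt]
        by_cases h2 : dist = 2
        · have hcond : (dist == 2) = true := by simp [h2]
          rw [hcond, if_pos rfl]
          have : min m (pvMin (pvStep p (x :: rest))) = 2 := by
            rw [hstep]; omega
          rw [this]
          decide
        · rw [if_neg (by simp [h2])]
          rw [← hlen, ih (p ++ [x]) _ dist hins (by omega) (by omega)]
          have : min m (pvMin (pvStep p (x :: rest))) = min dist G := by rw [hstep]; omega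
          rw [this]
      · rw [if_neg hlt]
        rw [← hlen, ih (p ++ [x]) _ m hins hm1 hm2]
        have : min m (pvMin (pvStep p (x :: rest))) = min m G := by rw [hstep]; omega
        rw [this]

theorem pvOcc_singleton (x : Int) (s : String) :
    pvOcc [x] s = if pvKey x == s then [(0 : Int)] else [] := by
  have := pvOcc_append_singleton [] x s
  simpa [show pvOcc [] s = [] from rfl] using this

theorem pvA_char (x : Int) (rest : List Int) :
    minimumCardPickup (x :: rest) =
      (if (pvMin (pvStep [] (x :: rest)) == 100001) then -1 else pvMin (pvStep [] (x :: rest))) := by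
  have hd0 : ∀ s, (PySem.Dict.ofList [(PySem.Int.toStr x, 0)]).get? s = pvLast [x] s := by
    intro s
    rw [show (PySem.Dict.ofList [(PySem.Int.toStr x, (0 : Int))]) = PySem.Dict.mk [(PySem.Int.toStr x, 0)] from rfl,
      PySem.Dict.get?_mk_cons]
    unfold pvLast
    rw [pvOcc_singleton]
    by_cases hs : (pvKey x == s) = true
    · have he := (beq_iff_eq).mp hs
      simp only [pvKey] at hs he
      simp [pvKey, he]
    · have h1 : (PySem.Int.toStr x == s) = false := by simpa [pvKey] using hs
      simp [h1, hs, PySem.Dict.get?]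
  have hstep0 : pvStep [] (x :: rest) = pvStep [x] rest := rfl
  have hkey := pvAgo_eq rest [x] (PySem.Dict.ofList [(PySem.Int.toStr x, 0)]) 100001 hd0 (by omega) (by omega)
  simp only [List.length_singleton, Nat.cast_one] at hkey
  rw [show minimumCardPickup (x :: rest) = pvAgo rest 1 (PySem.Dict.ofList [(PySem.Int.toStr x, 0)]) 100001 from rfl,
    hkey, hstep0]
  have : min (100001 : Int) (pvMin (pvStep [x] rest)) = pvMin (pvStep [x] rest) := by
    have := pvMin_le_top (pvStep [x] rest); omega
  rw [this]

-- ---- B side ----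
theorem pvBbuild_eq (l : List Int) :
    pvBbuild l = ((PySem.List.enumerate l 0).map
      (fun p => (PySem.Int.toStr p.2, p.1))).foldl
      (fun d q => d.modify q.1 [] (fun xs => xs ++ [q.2])) PySem.Dict.empty := by
  rw [List.foldl_map]; rfl

theorem pvFilterMap_aux (e : List (Int × Int)) (s : String) :
    ((e.map (fun p => (PySem.Int.toStr p.2, p.1))).filter (fun q => q.1 == s)).map (·.2)
      = e.filterMap (fun q => if pvKey q.2 == s then some q.1 else none) := by
  induction e with
  | nil => rfl
  | cons p e ih =>
    simp only [List.map_cons, List.filter_cons, List.filterMap_cons]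
    by_cases h : (PySem.Int.toStr p.2 == s) = true
    · simp [pvKey, h] at ih ⊢; exact ih
    · simp [pvKey, h] at ih ⊢; exact ih

theorem pvBbuild_getD (l : List Int) (s : String) : (pvBbuild l).getD s [] = pvOcc l s := by
  rw [pvBbuild_eq, PySem.Dict.getD_foldl_modify_append]
  simp only [PySem.Dict.getD_empty, List.nil_append]
  exact pvFilterMap_aux _ s

theorem pvBbuild_keys_nodup (l : List Int) : (pvBbuild l).keys.Nodup := by
  unfold pvBbuild
  exact PySem.Dict.nodup_keys_foldl_modify_key _ _ _ _ _ PySem.Dict.nodup_keys_empty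

theorem pvBbuild_keys_mem {l : List Int} {s : String} :
    s ∈ (pvBbuild l).keys ↔ ∃ v ∈ l, s = pvKey v := by
  unfold pvBbuild
  rw [PySem.Dict.keys_foldl_modify_key]
  rw [show PySem.Dict.empty.keys = ([] : List String) from rfl]
  rw [PySem.Set.update_nil_left]
  rw [PySem.Set.mem_ofList]
  constructor
  · rintro h
    obtain ⟨p, hp, rfl⟩ := List.mem_map.mp h
    obtain ⟨k, hk, rfl⟩ := (PySem.List.mem_enumerate_iff _ _ _).mp hp
    exact ⟨l[k], by simp, rfl⟩
  · rintro ⟨v, hv, rfl⟩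
    obtain ⟨k, hk, hvk⟩ := List.mem_iff_getElem.mp hv
    exact List.mem_map.mpr ⟨((0 : Int) + k, l[k]), (PySem.List.mem_enumerate_iff _ _ _).mpr ⟨k, hk, rfl⟩, by rw [hvk]; rfl⟩

theorem pvOuter (ls : List (List Int)) : ∀ b : Int, b ≤ 100001 →
    ls.foldl (fun b idx => (idx.zip idx.tail).foldl (fun b p => min b (p.2 - p.1 + 1)) b) b
      = min b (pvMin (ls.map pvGapsOf).flatten) := by
  induction ls with
  | nil => intro b hb; simp [pvMin]; omega
  | cons idx ls ih =>
    intro b hb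
    rw [List.foldl_cons]
    have hinner : (idx.zip idx.tail).foldl (fun b p => min b (p.2 - p.1 + 1)) b
        = min b (pvMin (pvGapsOf idx)) := by
      rw [show (idx.zip idx.tail).foldl (fun b p => min b (p.2 - p.1 + 1)) b
          = (pvGapsOf idx).foldl min b by rw [pvGapsOf, List.foldl_map], pvFoldl_min _ b hb]
    rw [hinner, ih _ (by have := pvMin_le_top (pvGapsOf idx); omega)]
    simp only [List.map_cons, List.flatten_cons, pvMin_append]
    omega

theorem pvB_char (l : List Int) :
    minimumCardPickup_alt l = (if (pvMin (pvBgaps l) == 100001) then -1 else pvMin (pvBgaps l)) := by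
  rw [show minimumCardPickup_alt l = (if (((pvBbuild l).values.foldl (fun b idx => (idx.zip idx.tail).foldl (fun b p => min b (p.2 - p.1 + 1)) b) 100001) == 100001) = true then -1 else ((pvBbuild l).values.foldl (fun b idx => (idx.zip idx.tail).foldl (fun b p => min b (p.2 - p.1 + 1)) b) 100001)) from rfl]
  rw [PySem.Dict.values_eq_map_keys _ (pvBbuild_keys_nodup l) []]
  rw [List.foldl_map, show (fun (b : Int) (k : String) => ((((pvBbuild l).getD k []).zip ((pvBbuild l).getD k []).tail).foldl (fun b p => min b (p.2 - p.1 + 1)) b)) = (fun (b : Int) (k : String) => (((pvOcc l k).zip (pvOcc l k).tail).foldl (fun b p => min b (p.2 - p.1 + 1)) b)) from by funext b k; rw [pvBbuild_getD]]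
  rw [← List.foldl_map (f := fun s => pvOcc l s) (g := fun b idx => ((idx.zip idx.tail).foldl (fun b p => min b (p.2 - p.1 + 1)) b))]
  rw [pvOuter _ 100001 (by omega)]
  have hfl : ((((pvBbuild l).keys.map fun s => pvOcc l s).map pvGapsOf)).flatten = pvBgaps l := by
    rw [List.map_map]; rfl
  rw [hfl]
  have : min (100001 : Int) (pvMin (pvBgaps l)) = pvMin (pvBgaps l) := by
    have := pvMin_le_top (pvBgaps l); omega
  rw [this]

theorem pvZip_tail_mem {idx : List Int} (hs : idx.Pairwise (· < ·)) {q : Int × Int}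
    (hq : q ∈ idx.zip idx.tail) : q.1 ∈ idx ∧ q.2 ∈ idx ∧ q.1 < q.2 := by
  obtain ⟨k, hk, hkq⟩ := List.mem_iff_getElem.mp hq
  have hklen : k + 1 < idx.length := by
    simp [List.length_zip, List.length_tail] at hk; omega
  have hkt : k < idx.tail.length := by rw [List.length_tail]; omega
  have h1 : (idx.zip idx.tail)[k] = (idx[k]'(by omega), idx.tail[k]'hkt) := List.getElem_zip
  have h2 : idx.tail[k]'hkt = idx[k + 1]'hklen := by
    rw [List.getElem_tail]
  have hlt : idx[k] < idx[k + 1] := List.pairwise_iff_getElem.mp hs k (k+1) (by omega) hklen (by omega)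
  rw [h1, h2] at hkq
  subst hkq
  exact ⟨List.getElem_mem _, List.getElem_mem _, hlt⟩

theorem pvSorted_adj : ∀ (idx : List Int), idx.Pairwise (· < ·) → ∀ a b : Int, a ∈ idx → b ∈ idx → a < b →
    ∃ q ∈ idx.zip idx.tail, a ≤ q.1 ∧ q.1 < q.2 ∧ q.2 ≤ b := by
  intro idx
  induction idx with
  | nil => intro _ a b ha; simp at ha
  | cons c t ih =>
    intro hp a b ha hb hab
    have hpc := List.pairwise_cons.mp hp
    rcases List.mem_cons.mp ha with rfl | hat
    · have hbt : b ∈ t := by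
        rcases List.mem_cons.mp hb with rfl | h
        · omega
        · exact h
      match t, hbt with
      | y :: t', hbt =>
        refine ⟨(a, y), ?_, le_refl a, hpc.1 y (by simp), ?_⟩
        · simp [List.zip]
        · rcases List.mem_cons.mp hbt with rfl | h
          · omega
          · have := (List.pairwise_cons.mp hpc.2).1 b h
            omega
    · have hbt : b ∈ t := by
        rcases List.mem_cons.mp hb with rfl | h
        · have := hpc.1 a hat; omega
        · exact h
      obtain ⟨q, hq, h1, h2, h3⟩ := ih hpc.2 a b hat hbt hab
      refine ⟨q, ?_, h1, h2, h3⟩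
      match t, hq with
      | y :: t', hq =>
        right
        exact hq

theorem pvBgaps_mem_P : ∀ (l : List Int) (g : Int), g ∈ pvBgaps l → pvP l g := by
  intro l g hg
  obtain ⟨gs, hgs, hggs⟩ := List.mem_flatten.mp hg
  obtain ⟨s, _, rfl⟩ := List.mem_map.mp hgs
  obtain ⟨q, hq, rfl⟩ := List.mem_map.mp hggs
  obtain ⟨h1, h2, h3⟩ := pvZip_tail_mem (pvOcc_sorted l s) hq
  obtain ⟨i, hi, hq1, hki⟩ := mem_pvOcc.mp h1
  obtain ⟨j, hj, hq2, hkj⟩ := mem_pvOcc.mp h2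
  refine ⟨i, j, by omega, hj, by rw [hki, hkj], by omega⟩

theorem pvBgaps_dom : ∀ (l : List Int) (g : Int), pvP l g → ∃ g' ∈ pvBgaps l, g' ≤ g := by
  intro l g hP
  obtain ⟨i, j, hij, hj, hkey, rfl⟩ := hP
  set s := pvKey (l.getD j 0) with hs
  have hiocc : (i : Int) ∈ pvOcc l s := mem_pvOcc.mpr ⟨i, by omega, rfl, hkey⟩
  have hjocc : (j : Int) ∈ pvOcc l s := mem_pvOcc.mpr ⟨j, hj, rfl, rfl⟩
  obtain ⟨q, hq, h1, h2, h3⟩ := pvSorted_adj _ (pvOcc_sorted l s) _ _ hiocc hjocc (by omega)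
  have hsk : s ∈ (pvBbuild l).keys := by
    refine pvBbuild_keys_mem.mpr ⟨l.getD j 0, ?_, rfl⟩
    rw [List.getD_eq_getElem l 0 hj]
    exact List.getElem_mem _
  refine ⟨q.2 - q.1 + 1, ?_, by omega⟩
  exact List.mem_flatten.mpr ⟨pvGapsOf (pvOcc l s),
    List.mem_map.mpr ⟨s, hsk, rfl⟩, List.mem_map.mpr ⟨q, hq, rfl⟩⟩

-- ---- assembly ----
theorem pvMins_agree (l : List Int) : pvMin (pvStep [] l) = pvMin (pvBgaps l) := by
  apply pvMin_eq_of_dom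
  · intro g hg
    exact pvBgaps_dom l g (by simpa using pvStep_mem_P l [] g hg)
  · intro g hg
    obtain ⟨i, j, hij, hj, hk, hgeq⟩ := pvBgaps_mem_P l g hg
    obtain ⟨g', hg', hle⟩ := pvStep_dom l [] i j (by simp) (by simpa using hj) hij (by simpa using hk)
    exact ⟨g', hg', by omega⟩

-- ===== VERDICT (by name: the statement is the Claim_ definition above) =====
theorem minimumCardPickup_spec : Claim_equal_minimumCardPickup := by
  intro l _ hpre
  unfold Spec_minimumCardPickup
  match l with
  | [] => exact absurd rfl hpre
  | x :: rest => rw [pvA_char, pvB_char, pvMins_agree]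

theorem minimumCardPickup_raises : Claim_raises_minimumCardPickup := by
  unfold Claim_raises_minimumCardPickup
  exact ⟨fun l _ h => by simp [Raises_minimumCardPickup] at h; simp [h, Pre_minimumCardPickup], by decide⟩

-- witness self-check: the crash-fix witness value really is what B's port returns on []
theorem pvRaiseWitness_ok : minimumCardPickup_alt pvRaiseWitness_minimumCardPickup = pvRaiseWitnessOut_minimumCardPickup :=
  minimumCardPickup_raises.2.2.2
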